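-- pv_equiv track=rewrite | github.com/Sewef/PTU-Data | py/pokedex/pokedex_sort_by_number.py | insert_after_species
-- ===== SOURCE A (Python) =====
-- from collections import OrderedDict
--
-- def insert_after_species(e: OrderedDict, key: str, number_val):
--     """
--     e: entrée (OrderedDict)
--     key: "Species" ou "Specie"
--     number_val: valeur à mettre dans Number
--     Retourne un OrderedDict avec Number juste après la clé 'key'
--     """
--     # enlever Number s'il existe déjà
--     e.pop("Number", None)
--
--     new_e = OrderedDict()
--     inserted = False
--     for k, v in e.items():
--         new_e[k] = v
--         if not inserted and k == key:
--             new_e["Number"] = number_val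
--             inserted = True
--     if not inserted:  # fallback si pas de clé espèce
--         new_e["Number"] = number_val
--     return new_e
-- ===== SOURCE B (Python) =====
-- from collections import OrderedDict
--
-- def insert_after_species(e: OrderedDict, key: str, number_val):
--     # Mutates e via pop("Number"), exactly like A.
--     e.pop("Number", None)
--     items = list(e.items())
--     keys = [k for k, _ in items]
--     pos = keys.index(key) + 1 if key in keys else len(items)
--     items.insert(pos, ("Number", number_val))
--     return OrderedDict(items)
-- ===== Notes on version B (the rewrite author's own statement) =====
-- stated objective: alternative
-- what changed: Replaces A's flag-driven copy loop (rebuild the dict entry by entry, setting Number when the key is seen) by compute-the-insertion-position-then-splice: find the index of the key (or the end), insert the ('Number', value) pair there, and rebuild once.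
import Mathlib
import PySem

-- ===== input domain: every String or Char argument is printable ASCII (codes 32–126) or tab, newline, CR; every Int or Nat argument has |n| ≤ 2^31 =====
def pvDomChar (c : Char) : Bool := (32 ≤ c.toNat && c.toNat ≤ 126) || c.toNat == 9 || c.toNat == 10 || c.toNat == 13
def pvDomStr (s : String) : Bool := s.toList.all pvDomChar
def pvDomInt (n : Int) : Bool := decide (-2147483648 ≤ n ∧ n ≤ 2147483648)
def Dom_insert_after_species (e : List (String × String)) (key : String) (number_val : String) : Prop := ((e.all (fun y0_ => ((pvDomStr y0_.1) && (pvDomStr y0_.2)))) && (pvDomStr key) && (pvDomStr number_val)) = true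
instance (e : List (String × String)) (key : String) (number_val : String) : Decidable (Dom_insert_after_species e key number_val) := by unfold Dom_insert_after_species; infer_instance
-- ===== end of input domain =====

-- B replaces A's flag-driven rebuild loop by compute-position-then-splice; both mutate e via pop("Number") in Python
-- (the equivalence proved here is about the return value).

-- ===== PORT A =====
-- the body of A's 'for k, v in e.items()' loop: new_e[k] = v; if not inserted and k == key: new_e["Number"] = number_val
def stepA (key number_val : String) (acc : PySem.Dict String String × Bool) (kv : String × String) : PySem.Dict String String × Bool :=
  let new_e := acc.1.insert kv.1 kv.2
  if !acc.2 && (kv.1 == key) then (new_e.insert "Number" number_val, true) else (new_e, acc.2)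

def insert_after_species (e : List (String × String)) (key : String) (number_val : String) : List (String × String) :=
  -- e.pop("Number", None): removes the entry keyed "Number" (unique under Pre_) — exact
  let e2 := e.filter (fun p => !(p.1 == "Number"))
  let r := e2.foldl (stepA key number_val) (PySem.Dict.empty, false)
  let fin := if !r.2 then r.1.insert "Number" number_val else r.1
  fin.items

-- ===== PORT B =====
def insert_after_species_alt (e : List (String × String)) (key : String) (number_val : String) : List (String × String) :=
  -- e.pop("Number", None); items = list(e.items())
  let items := e.filter (fun p => !(p.1 == "Number"))
  let keys := items.map Prod.fst
  let pos : Int := if keys.contains key then ((PySem.List.index? keys key).getD 0 : Nat) + 1 else (items.length : Int)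
  PySem.List.insert items pos ("Number", number_val)

-- ===== PRECONDITION & SPEC =====
-- Pre_ excludes lists with duplicate keys: they do not represent a Python dict (the argument e is an
-- OrderedDict, whose construction collapses duplicates before either function runs).
def Pre_insert_after_species (e : List (String × String)) (key : String) (number_val : String) : Prop :=
  (e.map Prod.fst).Nodup
instance (e : List (String × String)) (key : String) (number_val : String) : Decidable (Pre_insert_after_species e key number_val) := by unfold Pre_insert_after_species; infer_instance

def pvWitness_insert_after_species : (List (String × String)) × String × String :=
  ([("Species", "Pikachu"), ("Type", "Electric")], "Species", "25")

def Spec_insert_after_species (e : List (String × String)) (key : String) (number_val : String) (out : List (String × String)) : Prop := out = insert_after_species_alt e key number_val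
instance (e : List (String × String)) (key : String) (number_val : String) (out : List (String × String)) : Decidable (Spec_insert_after_species e key number_val out) := by unfold Spec_insert_after_species; infer_instance

-- ===== CLAIM (what is proved, stated in full; the proofs are below) =====
def Claim_equal_insert_after_species : Prop := ∀ (e : List (String × String)) (key : String) (number_val : String), Dom_insert_after_species e key number_val → Pre_insert_after_species e key number_val → Spec_insert_after_species e key number_val (insert_after_species e key number_val)

-- ===== LEMMAS AND PROOFS =====

-- the common target shape: the filtered list with ("Number", nv) spliced in after the key (or at the end)
def splice (l : List (String × String)) (key number_val : String) : List (String × String) :=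
  match PySem.List.index? (l.map Prod.fst) key with
  | some i => l.take (i + 1) ++ ("Number", number_val) :: l.drop (i + 1)
  | none => l ++ [("Number", number_val)]

-- once the flag is true, A's loop just copies the remaining entries
theorem loopA_true (key number_val : String) (l : List (String × String)) :
    ∀ d : PySem.Dict String String,
      l.foldl (stepA key number_val) (d, true)
        = (l.foldl (fun d kv => d.insert kv.1 kv.2) d, true) := by
  induction l with
  | nil => intro d; rfl
  | cons kv l ih => intro d; simpa [stepA] using ih (d.insert kv.1 kv.2)

theorem loopA_main (key number_val : String) :
    ∀ (l : List (String × String)) (d : PySem.Dict String String),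
      (∀ p ∈ l, d.contains p.1 = false) →
      (l.map Prod.fst).Nodup →
      "Number" ∉ l.map Prod.fst →
      d.contains "Number" = false →
      (let r := l.foldl (stepA key number_val) (d, false)
       (if !r.2 then r.1.insert "Number" number_val else r.1).items)
        = d.items ++ splice l key number_val := by
  intro l
  induction l with
  | nil =>
      intro d _ _ _ hnum
      simp [splice, PySem.List.index?, PySem.Dict.items_insert_of_not_contains _ _ hnum]
  | cons kv l ih =>
      intro d hfresh hnodup hnonum hnum
      have hkvfresh : d.contains kv.1 = false := hfresh kv (by simp)
      have hkvnum : kv.1 ≠ "Number" := by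
        intro h; exact hnonum (by simp [h])
      by_cases hk : kv.1 = key
      · -- the key is found at the head: flag becomes true, rest is copied
        have hstep : stepA key number_val (d, false) kv
            = ((d.insert kv.1 kv.2).insert "Number" number_val, true) := by
          simp [stepA, hk]
        have hfresh2 : ∀ p ∈ l, ((d.insert kv.1 kv.2).insert "Number" number_val).contains p.1 = false := by
          intro p hp
          have hpkv : p.1 ≠ kv.1 := by
            have := hnodup
            simp only [List.map_cons, List.nodup_cons] at this
            intro h; exact this.1 (h ▸ List.mem_map_of_mem hp)
          have hpnum : p.1 ≠ "Number" := by
            intro h; exact hnonum (by simp only [List.map_cons, List.mem_cons]; right; exact List.mem_map.mpr ⟨p, hp, h⟩)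
          simp [PySem.Dict.contains_insert, hpkv, hpnum, hfresh p (List.mem_cons_of_mem _ hp)]
        have hitems : ((d.insert kv.1 kv.2).insert "Number" number_val).items
            = d.items ++ [kv, ("Number", number_val)] := by
          have h1 : (d.insert kv.1 kv.2).contains "Number" = false := by
            simp [PySem.Dict.contains_insert, Ne.symm hkvnum, hnum]
          rw [PySem.Dict.items_insert_of_not_contains _ _ h1,
              PySem.Dict.items_insert_of_not_contains _ _ hkvfresh]
          simp
        have hidx : PySem.List.index? ((kv :: l).map Prod.fst) key = some 0 := by
          simp only [List.map_cons, hk]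
          exact PySem.List.index?_cons_self _ _
        simp only [List.foldl_cons, hstep, loopA_true, splice, hidx, Bool.not_true, Bool.false_eq_true, if_false]
        rw [PySem.Dict.items_foldl_insert_fresh l Prod.fst Prod.snd _ hfresh2 (by simpa using (List.nodup_cons.mp (by simpa using hnodup)).2)]
        simp [hitems]
      · -- head key differs: one plain insert, recurse
        have hstep : stepA key number_val (d, false) kv = (d.insert kv.1 kv.2, false) := by
          simp [stepA, hk]
        have hfresh2 : ∀ p ∈ l, (d.insert kv.1 kv.2).contains p.1 = false := by
          intro p hp
          have hpkv : p.1 ≠ kv.1 := by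
            have := hnodup
            simp only [List.map_cons, List.nodup_cons] at this
            intro h; exact this.1 (h ▸ List.mem_map_of_mem hp)
          simp [PySem.Dict.contains_insert, hpkv, hfresh p (List.mem_cons_of_mem _ hp)]
        have hnum2 : (d.insert kv.1 kv.2).contains "Number" = false := by
          simp [PySem.Dict.contains_insert, Ne.symm hkvnum, hnum]
        have hrec := ih (d.insert kv.1 kv.2) hfresh2
          (by simpa using (List.nodup_cons.mp (by simpa using hnodup)).2)
          (fun h => hnonum (by simp only [List.map_cons, List.mem_cons]; right; exact h))
          hnum2
        have hidx : PySem.List.index? ((kv :: l).map Prod.fst) key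
            = (PySem.List.index? (l.map Prod.fst) key).map (· + 1) := by
          simp only [List.map_cons]
          exact PySem.List.index?_cons_of_ne _ hk
        simp only [List.foldl_cons, hstep]
        simp only [splice, hidx]
        rw [hrec, PySem.Dict.items_insert_of_not_contains _ _ hkvfresh]
        simp only [splice]
        cases hcase : PySem.List.index? (l.map Prod.fst) key with
        | none => simp
        | some i => simp

-- the spliced shape equals B's insert-at-position
theorem alt_shape (e : List (String × String)) (key number_val : String) :
    insert_after_species_alt e key number_val
      = splice (e.filter (fun p => !(p.1 == "Number"))) key number_val := by
  unfold insert_after_species_alt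
  set l := e.filter (fun p => !(p.1 == "Number")) with hl
  by_cases hmem : key ∈ l.map Prod.fst
  · obtain ⟨i, hi⟩ := Option.isSome_iff_exists.mp ((PySem.List.index?_isSome_iff _ _).mpr hmem)
    obtain ⟨hk, -, -⟩ := PySem.List.getElem_of_index?_eq_some hi
    have hlen : i + 1 ≤ l.length := by simpa using hk
    simp only [splice, hi, List.contains_eq_mem, hmem, decide_true, if_true, Option.getD_some]
    rw [show (((i : Nat) : Int) + 1) = (((i + 1 : Nat) : Int)) by push_cast; ring,
        PySem.List.insert_natCast l (i + 1) _ hlen]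
  · have hnone : PySem.List.index? (l.map Prod.fst) key = none :=
      (PySem.List.index?_eq_none_iff _ _).mpr hmem
    simp only [splice, hnone, List.contains_eq_mem, hmem, decide_false, Bool.false_eq_true, if_false]
    rw [PySem.List.insert_natCast l l.length _ (le_refl _)]
    simp

-- ===== VERDICT (by name: the statement is the Claim_ definition above) =====
theorem insert_after_species_spec : Claim_equal_insert_after_species := by
  intro e key number_val _ hpre
  unfold Spec_insert_after_species insert_after_species
  set l := e.filter (fun p => !(p.1 == "Number")) with hl
  have hsub : (l.map Prod.fst).Sublist (e.map Prod.fst) :=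
    List.Sublist.map Prod.fst List.filter_sublist
  have hnodup : (l.map Prod.fst).Nodup := hpre.sublist hsub
  have hnonum : "Number" ∉ l.map Prod.fst := by
    intro h
    obtain ⟨p, hp, hp1⟩ := List.mem_map.mp h
    have := List.of_mem_filter hp
    simp [hp1] at this
  have := loopA_main key number_val l PySem.Dict.empty
    (by intro p _; simp [PySem.Dict.contains_empty])
    hnodup hnonum (by simp [PySem.Dict.contains_empty])
  simp only at this
  rw [this, alt_shape]
  simp [PySem.Dict.empty, ← hl]
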